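-- pv_equiv track=rewrite | github.com/johnmarktaylor91/torchlens | torchlens/graph_handling.py | pretty_print_list_w_line_breaks
-- ===== SOURCE A (Python) =====
-- def pretty_print_list_w_line_breaks(lst, indent_chars: str, line_break_every=5):
--     """
--     Utility function to pretty print a list with line breaks, adding indent_chars every line.
--     """
--     s = f'\n{indent_chars}'
--     for i, item in enumerate(lst):
--         s += f"{item}"
--         if i < len(lst) - 1:
--             s += ', '
--         if ((i + 1) % line_break_every == 0) and (i < len(lst) - 1):
--             s += f'\n{indent_chars}'
--     return s
-- ===== SOURCE B (Python) =====
-- def pretty_print_list_w_line_breaks(lst, indent_chars: str, line_break_every=5):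
--     """Collect the items into per-line lists, then join the lines with indented newlines."""
--     lines = []
--     current = []
--     for i, item in enumerate(lst):
--         current.append(f"{item}")
--         if (i + 1) % line_break_every == 0 and i < len(lst) - 1:
--             lines.append(current)
--             current = []
--     lines.append(current)
--     sep = '\n' + indent_chars
--     return sep + (', ' + sep).join(', '.join(line) for line in lines)
-- ===== Notes on version B (the rewrite author's own statement) =====
-- stated objective: alternative
-- what changed: B accumulates the items into per-line lists and joins everything once at the end, instead of A's single running string grown with '+=' per item; Pre_ excludes only line_break_every = 0 with a nonempty list, where both programs raise ZeroDivisionError.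
import Mathlib
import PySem

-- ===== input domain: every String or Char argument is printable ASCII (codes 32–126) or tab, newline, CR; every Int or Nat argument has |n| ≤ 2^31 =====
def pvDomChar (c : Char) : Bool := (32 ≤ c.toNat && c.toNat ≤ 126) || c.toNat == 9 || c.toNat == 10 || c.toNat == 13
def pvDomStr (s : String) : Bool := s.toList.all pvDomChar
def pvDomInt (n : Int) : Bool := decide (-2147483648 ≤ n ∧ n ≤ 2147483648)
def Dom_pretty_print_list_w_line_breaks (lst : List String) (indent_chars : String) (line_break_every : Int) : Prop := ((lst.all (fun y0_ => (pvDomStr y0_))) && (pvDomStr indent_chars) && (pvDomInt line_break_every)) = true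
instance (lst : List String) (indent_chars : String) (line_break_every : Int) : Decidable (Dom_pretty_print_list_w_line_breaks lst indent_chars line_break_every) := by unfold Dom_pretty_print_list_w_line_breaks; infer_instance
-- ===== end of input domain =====

-- B accumulates the items into per-line lists and joins everything once at the end, instead of
-- A's single running string grown with '+=' per item (same asymptotic cost; a different decomposition).

-- ===== PORT A =====
-- literal transliteration of A: a running string built char-list-side (PySem.Chars); f"{item}" on a str is the item itself
def pretty_print_list_w_line_breaks (lst : List String) (indent_chars : String) (line_break_every : Int) : String :=
  let s : List Char := '\n' :: indent_chars.toList
  let s := (PySem.List.enumerate lst).foldl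
    (fun s p =>
      let s := s ++ p.2.toList
      let s := if p.1 < (lst.length : Int) - 1 then s ++ [',', ' '] else s
      if (PySem.Int.mod (p.1 + 1) line_break_every == 0) && decide (p.1 < (lst.length : Int) - 1)
      then s ++ ('\n' :: indent_chars.toList) else s)
    s
  String.ofList s

-- ===== PORT B =====
-- transliteration of Source B: the loop carries (lines, current); joins are PySem.Chars.join
def pretty_print_list_w_line_breaks_alt (lst : List String) (indent_chars : String) (line_break_every : Int) : String :=
  let p := (PySem.List.enumerate lst).foldl
    (fun (st : List (List String) × List String) q =>
      let current := st.2 ++ [q.2]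
      if (PySem.Int.mod (q.1 + 1) line_break_every == 0) && decide (q.1 < (lst.length : Int) - 1)
      then (st.1 ++ [current], [])
      else (st.1, current))
    (([] : List (List String)), ([] : List String))
  let lines := p.1 ++ [p.2]
  let sep : List Char := '\n' :: indent_chars.toList
  String.ofList (sep ++ PySem.Chars.join ([',', ' '] ++ sep)
    (lines.map (fun l => PySem.Chars.join [',', ' '] (l.map String.toList))))

-- ===== PRECONDITION & SPEC =====
-- Both A and B raise ZeroDivisionError (the '% line_break_every' test) when line_break_every = 0
-- and the list is nonempty; Pre_ excludes exactly those inputs.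
def Pre_pretty_print_list_w_line_breaks (lst : List String) (indent_chars : String) (line_break_every : Int) : Prop :=
  line_break_every ≠ 0 ∨ lst = []
instance (lst : List String) (indent_chars : String) (line_break_every : Int) : Decidable (Pre_pretty_print_list_w_line_breaks lst indent_chars line_break_every) := by unfold Pre_pretty_print_list_w_line_breaks; infer_instance
def pvWitness_pretty_print_list_w_line_breaks : List String × String × Int := (["a", "bb", "c"], "  ", 2)

def Spec_pretty_print_list_w_line_breaks (lst : List String) (indent_chars : String) (line_break_every : Int) (out : String) : Prop := out = pretty_print_list_w_line_breaks_alt lst indent_chars line_break_every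
instance (lst : List String) (indent_chars : String) (line_break_every : Int) (out : String) : Decidable (Spec_pretty_print_list_w_line_breaks lst indent_chars line_break_every out) := by unfold Spec_pretty_print_list_w_line_breaks; infer_instance

-- ===== CLAIM (what is proved, stated in full; the proofs are below) =====
def Claim_equal_pretty_print_list_w_line_breaks : Prop := ∀ (lst : List String) (indent_chars : String) (line_break_every : Int), Dom_pretty_print_list_w_line_breaks lst indent_chars line_break_every → Pre_pretty_print_list_w_line_breaks lst indent_chars line_break_every → Spec_pretty_print_list_w_line_breaks lst indent_chars line_break_every (pretty_print_list_w_line_breaks lst indent_chars line_break_every)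

-- ===== LEMMAS AND PROOFS =====

-- per-item contribution in A, with the break test abstracted to brk : Nat → Bool on the 1-based index
def pvJ (brk : Nat → Bool) (n : Nat) (sp : List Char) : List String → Nat → List Char
  | [], _ => []
  | x :: t, i =>
      x.toList ++ (if i + 1 < n then [',', ' '] else [])
        ++ (if brk (i + 1) && decide (i + 1 < n) then sp else []) ++ pvJ brk n sp t (i + 1)

-- the list of lines B's loop produces, abstracted the same way
def pvLines (brk : Nat → Bool) (n : Nat) : List String → Nat → List String → List (List String)
  | [], _, C => [C]
  | x :: t, i, C =>
      if brk (i + 1) && decide (i + 1 < n)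
      then (C ++ [x]) :: pvLines brk n t (i + 1) []
      else pvLines brk n t (i + 1) (C ++ [x])

-- A's fold (from Nat start index i0) is pvJ
theorem pvA_fold_eq_pvJ (ind : List Char) (lbe : Int) (n : Nat) (r : List String) (i0 : Nat) (acc : List Char) :
    (PySem.List.enumerate r (i0 : Int)).foldl
      (fun s p =>
        if (PySem.Int.mod (p.1 + 1) lbe == 0) && decide (p.1 < (n : Int) - 1)
        then (if p.1 < (n : Int) - 1 then s ++ p.2.toList ++ [',', ' '] else s ++ p.2.toList)
          ++ ('\n' :: ind)
        else (if p.1 < (n : Int) - 1 then s ++ p.2.toList ++ [',', ' '] else s ++ p.2.toList))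
      acc
    = acc ++ pvJ (fun j => PySem.Int.mod (j : Int) lbe == 0) n ('\n' :: ind) r i0 := by
  induction r generalizing i0 acc with
  | nil => simp [PySem.List.enumerate_nil, pvJ]
  | cons x t ih =>
    have hcast : ((i0 : Int) + 1) = ((i0 + 1 : Nat) : Int) := by push_cast; ring
    have hlt : ((i0 : Int) < (n : Int) - 1) ↔ (i0 + 1 < n) := by omega
    rw [PySem.List.enumerate_cons, List.foldl_cons, hcast, ih (i0 + 1)]
    simp only [pvJ]
    by_cases h1 : i0 + 1 < n
    · by_cases h2 : PySem.Int.mod ((i0 : Int) + 1) lbe = 0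
      · simp [h1, h2, hlt.mpr h1, List.append_assoc]
      · simp [h1, h2, hlt.mpr h1, List.append_assoc]
    · have h1' : ¬ ((i0 : Int) < (n : Int) - 1) := by omega
      simp [h1, h1', List.append_assoc]

theorem pvLines_ne_nil (brk : Nat → Bool) (n : Nat) (r : List String) (i0 : Nat) (C : List String) :
    pvLines brk n r i0 C ≠ [] := by
  induction r generalizing i0 C with
  | nil => simp [pvLines]
  | cons x t ih => simp only [pvLines]; split <;> simp [ih]

-- B's fold (from Nat start index i0 and state (L, C)) in terms of pvLines
theorem pvB_fold_eq_pvLines (lbe : Int) (n : Nat) (r : List String) (i0 : Nat)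
    (L : List (List String)) (C : List String) :
    (PySem.List.enumerate r (i0 : Int)).foldl
      (fun (st : List (List String) × List String) q =>
        if (PySem.Int.mod (q.1 + 1) lbe == 0) && decide (q.1 < (n : Int) - 1)
        then (st.1 ++ [st.2 ++ [q.2]], [])
        else (st.1, st.2 ++ [q.2]))
      (L, C)
    = (L ++ (pvLines (fun j => PySem.Int.mod (j : Int) lbe == 0) n r i0 C).dropLast,
       (pvLines (fun j => PySem.Int.mod (j : Int) lbe == 0) n r i0 C).getLastD []) := by
  induction r generalizing i0 L C with
  | nil => simp [PySem.List.enumerate_nil, pvLines]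
  | cons x t ih =>
    have hcast : ((i0 : Int) + 1) = ((i0 + 1 : Nat) : Int) := by push_cast; ring
    have hlt : ((i0 : Int) < (n : Int) - 1) ↔ (i0 + 1 < n) := by omega
    rw [PySem.List.enumerate_cons, List.foldl_cons, hcast, ih (i0 + 1)]
    simp only [pvLines]
    by_cases h1 : i0 + 1 < n
    · by_cases h2 : PySem.Int.mod ((i0 : Int) + 1) lbe = 0
      · obtain ⟨c, cs, hcs⟩ := List.exists_cons_of_ne_nil
          (pvLines_ne_nil (fun j => PySem.Int.mod (j : Int) lbe == 0) n t (i0 + 1) [])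
        simp [h1, h2, hlt.mpr h1, hcs, List.append_assoc]
      · simp [h1, h2, hlt.mpr h1]
    · have h1' : ¬ ((i0 : Int) < (n : Int) - 1) := by omega
      simp [h1, h1']

-- joining with sep over an appended last element
theorem pvJoin_append_singleton (sep b : List Char) (A : List (List Char)) (hA : A ≠ []) :
    PySem.Chars.join sep (A ++ [b]) = PySem.Chars.join sep A ++ sep ++ b := by
  induction A with
  | nil => exact absurd rfl hA
  | cons a t ih =>
    cases t with
    | nil => simp [PySem.Chars.join_singleton, PySem.Chars.join_cons_cons]
    | cons a' t' =>
      rw [List.cons_append, List.cons_append, PySem.Chars.join_cons_cons,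
        ← List.cons_append, ih (by simp), PySem.Chars.join_cons_cons]
      simp [List.append_assoc]

-- rendering B's lines equals A's per-item contribution (the key bridge)
theorem pvLines_join_eq_pvJ (brk : Nat → Bool) (n : Nat) (sp : List Char) (r : List String)
    (i0 : Nat) (C : List String) (hn : i0 + r.length = n) :
    PySem.Chars.join ([',', ' '] ++ sp)
        ((pvLines brk n r i0 C).map (fun l => PySem.Chars.join [',', ' '] (l.map String.toList)))
      = PySem.Chars.join [',', ' '] (C.map String.toList)
        ++ (if r = [] then []
            else (if C = [] then [] else [',', ' ']) ++ pvJ brk n sp r i0) := by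
  induction r generalizing i0 C with
  | nil => simp [pvLines, PySem.Chars.join_singleton]
  | cons x t ih =>
    have hxt : i0 + 1 < n ↔ t ≠ [] := by
      cases t <;> simp_all <;> omega
    have hCx : PySem.Chars.join [',', ' '] ((C ++ [x]).map String.toList)
        = PySem.Chars.join [',', ' '] (C.map String.toList)
          ++ (if C = [] then [] else [',', ' ']) ++ x.toList := by
      cases C with
      | nil => simp [PySem.Chars.join_singleton, PySem.Chars.join_nil]
      | cons c cs =>
        have hm : (c :: cs ++ [x]).map String.toList
            = ((c :: cs).map String.toList) ++ [x.toList] := by simp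
        rw [hm, pvJoin_append_singleton _ _ _ (by simp)]
        simp
    simp only [pvLines, pvJ]
    by_cases hb : (brk (i0 + 1) && decide (i0 + 1 < n)) = true
    · have h1 : i0 + 1 < n := by
        have h := hb; simp only [Bool.and_eq_true, decide_eq_true_eq] at h; exact h.2
      have ht : t ≠ [] := hxt.mp h1
      rw [if_pos hb, if_pos hb, List.map_cons]
      obtain ⟨c, cs, hcs⟩ := List.exists_cons_of_ne_nil (pvLines_ne_nil brk n t (i0 + 1) [])
      rw [hcs, List.map_cons, PySem.Chars.join_cons_cons]
      have hrest := ih (i0 + 1) [] (by simp at hn ⊢; omega)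
      rw [hcs] at hrest
      simp only [List.map_cons] at hrest
      rw [hrest, hCx]
      simp [ht, h1, List.append_assoc, PySem.Chars.join_nil]
    · rw [if_neg hb, if_neg hb]
      rw [ih (i0 + 1) (C ++ [x]) (by simp at hn ⊢; omega), hCx]
      by_cases ht : t = []
      · have h1 : ¬ (i0 + 1 < n) := fun h => (hxt.mp h) ht
        simp [ht, h1, List.append_assoc, pvJ]
      · have h1 : i0 + 1 < n := hxt.mpr ht
        simp [ht, h1, List.append_assoc]

theorem pv_dropLast_getLastD {α : Type} (l : List α) (d : α) (h : l ≠ []) :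
    l.dropLast ++ [l.getLastD d] = l := by
  cases l with
  | nil => exact absurd rfl h
  | cons a t =>
    rw [List.getLastD_eq_getLast?, List.getLast?_eq_some_getLast (l := a :: t) (by simp),
      Option.getD_some, List.dropLast_concat_getLast]

-- ===== VERDICT (by name: the statement is the Claim_ definition above) =====
theorem pretty_print_list_w_line_breaks_spec : Claim_equal_pretty_print_list_w_line_breaks := by
  intro lst indent_chars lbe _ _
  unfold Spec_pretty_print_list_w_line_breaks
  simp only [pretty_print_list_w_line_breaks, pretty_print_list_w_line_breaks_alt]
  have hA := pvA_fold_eq_pvJ indent_chars.toList lbe lst.length lst 0 ('\n' :: indent_chars.toList)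
  rw [Nat.cast_zero] at hA
  have hB := pvB_fold_eq_pvLines lbe lst.length lst 0 ([] : List (List String)) ([] : List String)
  rw [Nat.cast_zero] at hB
  rw [hA, hB]
  simp only [List.nil_append]
  rw [pv_dropLast_getLastD _ _ (pvLines_ne_nil _ _ _ _ _)]
  rw [pvLines_join_eq_pvJ (fun j => PySem.Int.mod (j : Int) lbe == 0) lst.length
    ('\n' :: indent_chars.toList) lst 0 [] (by simp)]
  cases lst with
  | nil => simp [pvJ, PySem.Chars.join_nil]
  | cons x t => simp [PySem.Chars.join_nil]
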